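-- pv_equiv track=rewrite | github.com/choibongseok/my-superagent | backend/app/services/template_service.py | _trim_lines
-- ===== SOURCE A (Python) =====
-- def _trim_lines(value: object) -> str:
--     """Trim each line, normalize newlines, and strip outer blank lines."""
--     normalized_text = str(value).replace("\r\n", "\n").replace("\r", "\n")
--     normalized_lines = [line.strip() for line in normalized_text.split("\n")]
--
--     while normalized_lines and normalized_lines[0] == "":
--         normalized_lines.pop(0)
--
--     while normalized_lines and normalized_lines[-1] == "":
--         normalized_lines.pop()
--
--     return "\n".join(normalized_lines)
-- ===== SOURCE B (Python) =====
-- def _trim_lines(value: object) -> str: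
--     """Trim each line, normalize newlines, and strip outer blank lines."""
--     normalized_text = str(value).replace("\r\n", "\n").replace("\r", "\n")
--     return "\n".join(line.strip() for line in normalized_text.split("\n")).strip("\n")
-- ===== Notes on version B (the rewrite author's own statement) =====
-- stated objective: simpler
-- what changed: The two while-loops that pop leading/trailing blank lines from the list are replaced by joining the stripped lines and trimming newline characters off both ends of the joined string; since every line is already stripped, outer blank lines correspond exactly to outer newline characters.
import Mathlib
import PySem

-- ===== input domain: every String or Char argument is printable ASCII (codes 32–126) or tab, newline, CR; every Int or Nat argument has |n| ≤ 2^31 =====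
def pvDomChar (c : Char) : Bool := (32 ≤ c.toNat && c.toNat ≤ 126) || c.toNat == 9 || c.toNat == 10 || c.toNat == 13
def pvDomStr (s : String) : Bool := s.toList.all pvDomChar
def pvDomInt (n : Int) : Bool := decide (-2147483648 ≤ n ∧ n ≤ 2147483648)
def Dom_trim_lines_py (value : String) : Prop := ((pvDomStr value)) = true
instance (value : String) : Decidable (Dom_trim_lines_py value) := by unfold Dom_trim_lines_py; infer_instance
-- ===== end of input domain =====

-- B replaces A's two while-loops that pop leading/trailing blank lines from the list
-- by joining the stripped lines and stripping '\n' characters off the joined string.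

-- ===== PORT A =====

-- `while normalized_lines and normalized_lines[0] == "": normalized_lines.pop(0)`
def popLeading : List (List Char) → List (List Char)
  | [] => []
  | l :: rest => if l = [] then popLeading rest else l :: rest

-- `while normalized_lines and normalized_lines[-1] == "": normalized_lines.pop()`
def popTrailing : List (List Char) → List (List Char)
  | [] => []
  | l :: rest =>
    match popTrailing rest with
    | [] => if l = [] then [] else [l]
    | r :: t => l :: r :: t

def trim_lines_py (value : String) : String :=
  let normalized :=
    PySem.Chars.replace (PySem.Chars.replace value.toList ['\r', '\n'] ['\n']) ['\r'] ['\n']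
  let lines := (PySem.Chars.splitOn normalized ['\n']).map PySem.Chars.strip
  String.ofList (PySem.Chars.join ['\n'] (popTrailing (popLeading lines)))

-- ===== PORT B =====
def trim_lines_py_alt (value : String) : String :=
  let normalized :=
    PySem.Chars.replace (PySem.Chars.replace value.toList ['\r', '\n'] ['\n']) ['\r'] ['\n']
  String.ofList (PySem.Chars.stripChars
    (PySem.Chars.join ['\n'] ((PySem.Chars.splitOn normalized ['\n']).map PySem.Chars.strip))
    ['\n'])

-- ===== PRECONDITION & SPEC =====
def Spec_trim_lines_py (value : String) (out : String) : Prop := out = trim_lines_py_alt value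
instance (value : String) (out : String) : Decidable (Spec_trim_lines_py value out) := by unfold Spec_trim_lines_py; infer_instance

-- ===== CLAIM (what is proved, stated in full; the proofs are below) =====
def Claim_equal_trim_lines_py : Prop := ∀ (value : String), Dom_trim_lines_py value → Spec_trim_lines_py value (trim_lines_py value)

-- ===== LEMMAS AND PROOFS =====

-- every element of a `strip`ped list is in the original
theorem mem_strip {x : Char} {l : List Char} (h : x ∈ PySem.Chars.strip l) : x ∈ l := by
  simp only [PySem.Chars.strip, PySem.Chars.rstrip, PySem.Chars.lstrip, List.mem_reverse] at h
  exact (List.dropWhile_sublist _).subset (List.mem_reverse.mp ((List.dropWhile_sublist _).subset h))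

-- the pieces of splitOn on ['\n'] contain no '\n'
theorem splitOn_go_no_newline : ∀ (fuel : Nat) (l cur : List Char) (acc : List (List Char)),
    l.length < fuel → (∀ x ∈ cur, x ≠ '\n') → (∀ p ∈ acc, ∀ x ∈ p, x ≠ '\n') →
    ∀ p ∈ PySem.Chars.splitOn.go ['\n'] fuel l cur acc, ∀ x ∈ p, x ≠ '\n' := by
  intro fuel
  induction fuel with
  | zero => intro l cur acc h; omega
  | succ n ih =>
    intro l cur acc hlen hcur hacc p hp
    match l with
    | [] =>
      simp only [PySem.Chars.splitOn.go, List.mem_reverse, List.mem_cons] at hp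
      rcases hp with h | h
      · subst h; intro x hx; exact hcur x (List.mem_reverse.mp hx)
      · exact hacc p h
    | c :: rest =>
      simp only [PySem.Chars.splitOn.go] at hp
      by_cases hpre : List.isPrefixOf ['\n'] (c :: rest) = true
      · rw [if_pos hpre] at hp
        refine ih _ _ _ (by simp at hlen ⊢; omega) (by simp) ?_ p hp
        intro q hq x hx
        rcases List.mem_cons.mp hq with h | h
        · subst h; exact hcur x (List.mem_reverse.mp hx)
        · exact hacc q h x hx
      · rw [if_neg hpre] at hp
        have hc : c ≠ '\n' := by
          intro h; subst h; exact hpre (by simp [List.isPrefixOf])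
        refine ih _ _ _ (by simp at hlen ⊢; omega) ?_ hacc p hp
        intro x hx
        rcases List.mem_cons.mp hx with h | h
        · subst h; exact hc
        · exact hcur x h
theorem splitOn_no_newline (s : List Char) :
    ∀ p ∈ PySem.Chars.splitOn s ['\n'], ∀ x ∈ p, x ≠ '\n' := by
  intro p hp
  exact splitOn_go_no_newline (s.length + 1) s [] [] (by omega) (by simp) (by simp) p hp

theorem mem_popLeading {x : List Char} {L : List (List Char)} (h : x ∈ popLeading L) : x ∈ L := by
  induction L with
  | nil => simp [popLeading] at h
  | cons l rest ih =>
    simp only [popLeading] at h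
    split_ifs at h with hl
    · exact List.mem_cons_of_mem _ (ih h)
    · exact h

-- the left strip of the joined string = popping leading blank lines
theorem dropWhile_join (L : List (List Char)) (h : ∀ l ∈ L, '\n' ∉ l) :
    List.dropWhile (fun c => List.contains ['\n'] c) (PySem.Chars.join ['\n'] L)
      = PySem.Chars.join ['\n'] (popLeading L) := by
  induction L with
  | nil => simp [PySem.Chars.join_nil, popLeading]
  | cons l rest ih =>
    by_cases hl : l = []
    · subst hl
      match rest with
      | [] => simp [PySem.Chars.join_singleton, popLeading]
      | r :: t =>
        rw [PySem.Chars.join_cons_cons]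
        simp only [List.nil_append, popLeading]
        rw [show ['\n'] ++ PySem.Chars.join ['\n'] (r :: t) = '\n' :: PySem.Chars.join ['\n'] (r :: t) from rfl]
        rw [List.dropWhile_cons_of_pos (by simp)]
        exact ih (fun q hq => h q (List.mem_cons_of_mem _ hq))
    · match l, hl with
      | a :: l', _ =>
        have ha : a ≠ '\n' := fun hh => h _ (List.mem_cons_self ..) (hh ▸ List.mem_cons_self ..)
        have hstop : ∀ z : List Char,
            List.dropWhile (fun c => List.contains ['\n'] c) (a :: z) = a :: z := by
          intro z; rw [List.dropWhile_cons_of_neg (by simp [ha])]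
        rw [show popLeading ((a :: l') :: rest) = (a :: l') :: rest from by simp [popLeading]]
        match rest with
        | [] => rw [PySem.Chars.join_singleton]; exact hstop l'
        | r :: t =>
          rw [PySem.Chars.join_cons_cons]
          simpa using hstop (l' ++ '\n' :: PySem.Chars.join ['\n'] (r :: t))

-- reversing a join reverses the pieces
theorem join_snoc (M : List (List Char)) (b : List Char) (hM : M ≠ []) :
    PySem.Chars.join ['\n'] (M ++ [b]) = PySem.Chars.join ['\n'] M ++ ['\n'] ++ b := by
  induction M with
  | nil => exact absurd rfl hM
  | cons x xs ih =>
    match xs with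
    | [] => simp [PySem.Chars.join_cons_cons, PySem.Chars.join_singleton]
    | y :: ys =>
      rw [List.cons_append, show (y :: ys) ++ [b] = y :: (ys ++ [b]) from rfl,
        PySem.Chars.join_cons_cons, show y :: (ys ++ [b]) = (y :: ys) ++ [b] from rfl,
        ih (by simp), PySem.Chars.join_cons_cons]
      simp

theorem join_reverse (L : List (List Char)) :
    (PySem.Chars.join ['\n'] L).reverse
      = PySem.Chars.join ['\n'] ((L.map List.reverse).reverse) := by
  induction L with
  | nil => simp [PySem.Chars.join_nil]
  | cons l rest ih =>
    match rest with
    | [] => simp [PySem.Chars.join_singleton]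
    | r :: t =>
      rw [PySem.Chars.join_cons_cons, List.map_cons, List.reverse_cons,
        join_snoc _ _ (by simp), ← ih]
      simp

theorem popLeading_map_reverse (L : List (List Char)) :
    popLeading (L.map List.reverse) = (popLeading L).map List.reverse := by
  induction L with
  | nil => rfl
  | cons l rest ih =>
    simp only [List.map_cons, popLeading]
    by_cases hl : l = []
    · subst hl; simp [ih]
    · rw [if_neg (by simpa using hl), if_neg hl, List.map_cons]

theorem popLeading_append_singleton (xs : List (List Char)) (l : List Char) :
    popLeading (xs ++ [l]) =
      match popLeading xs with
      | [] => if l = [] then [] else [l]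
      | r :: t => (r :: t) ++ [l] := by
  induction xs with
  | nil => simp [popLeading]
  | cons x rest ih =>
    simp only [List.cons_append, popLeading]
    by_cases hx : x = []
    · rw [if_pos hx, if_pos hx, ih]
      cases popLeading rest <;> rfl
    · rw [if_neg hx, if_neg hx]

theorem popTrailing_eq (L : List (List Char)) :
    popTrailing L = (popLeading L.reverse).reverse := by
  induction L with
  | nil => rfl
  | cons l rest ih =>
    simp only [popTrailing, List.reverse_cons, popLeading_append_singleton, ih]
    cases hpl : popLeading rest.reverse with
    | nil => split_ifs <;> rfl
    | cons r t =>
      rcases htr : t.reverse with _ | ⟨a, b⟩ <;> simp [htr]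

-- main bridge: stripping '\n' off the join = join after popping outer blank lines
theorem strip_join (L : List (List Char)) (h : ∀ l ∈ L, '\n' ∉ l) :
    PySem.Chars.stripChars (PySem.Chars.join ['\n'] L) ['\n']
      = PySem.Chars.join ['\n'] (popTrailing (popLeading L)) := by
  have hM : ∀ l ∈ popLeading L, '\n' ∉ l := fun l hl => h l (mem_popLeading hl)
  have hMr : ∀ l ∈ ((popLeading L).map List.reverse).reverse, '\n' ∉ l := by
    intro l hl
    simp only [List.mem_reverse, List.mem_map] at hl
    obtain ⟨a, ha, rfl⟩ := hl
    simpa using hM a ha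
  simp only [PySem.Chars.stripChars]
  rw [dropWhile_join L h, join_reverse, dropWhile_join _ hMr, join_reverse,
    popTrailing_eq]
  congr 1
  rw [← popLeading_map_reverse, List.map_reverse, List.map_map]
  simp

-- ===== VERDICT (by name: the statement is the Claim_ definition above) =====
theorem trim_lines_py_spec : Claim_equal_trim_lines_py := by
  intro value _
  simp only [Spec_trim_lines_py, trim_lines_py, trim_lines_py_alt]
  have h : ∀ l ∈ (PySem.Chars.splitOn
      (PySem.Chars.replace (PySem.Chars.replace value.toList ['\r', '\n'] ['\n']) ['\r'] ['\n'])
      ['\n']).map PySem.Chars.strip, '\n' ∉ l := by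
    intro l hl hx
    simp only [List.mem_map] at hl
    obtain ⟨q, hq, rfl⟩ := hl
    exact splitOn_no_newline _ q hq '\n' (mem_strip hx) rfl
  rw [strip_join _ h]
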